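-- pv_equiv track=rewrite | github.com/MrBrantCode/unitest_baseline | mut_generate/mist_train_cf/cf_64960/solution.py | even_odd_prime_count
-- ===== SOURCE A (Python) =====
-- def even_odd_prime_count(num):
--     even_count = 0
--     odd_count = 0
--     prime_count = 0
--     prime_list = [2,3,5,7]
--     for digit in str(abs(num)):
--         digit = int(digit)
--         if digit % 2 == 0:
--             even_count += 1
--         elif digit % 2 !=0:
--             odd_count += 1
--         if digit in prime_list:
--             prime_count += 1
--     return even_count, odd_count, prime_count
-- ===== SOURCE B (Python) =====
-- def even_odd_prime_count(num):
--     cnt = {}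
--     for ch in str(abs(num)):
--         cnt[ch] = cnt.get(ch, 0) + 1
--     even_count = sum(cnt.get(d, 0) for d in "02468")
--     odd_count = sum(cnt.get(d, 0) for d in "13579")
--     prime_count = sum(cnt.get(d, 0) for d in "2357")
--     return even_count, odd_count, prime_count
-- ===== Notes on version B (the rewrite author's own statement) =====
-- stated objective: idiomatic
-- what changed: B builds a digit-frequency dictionary in one pass and then reads the three answers off the table by summing counts over the fixed digit classes '02468', '13579', '2357', instead of A's per-digit branch-and-increment loop with int() conversion and a prime membership list.
import Mathlib
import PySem

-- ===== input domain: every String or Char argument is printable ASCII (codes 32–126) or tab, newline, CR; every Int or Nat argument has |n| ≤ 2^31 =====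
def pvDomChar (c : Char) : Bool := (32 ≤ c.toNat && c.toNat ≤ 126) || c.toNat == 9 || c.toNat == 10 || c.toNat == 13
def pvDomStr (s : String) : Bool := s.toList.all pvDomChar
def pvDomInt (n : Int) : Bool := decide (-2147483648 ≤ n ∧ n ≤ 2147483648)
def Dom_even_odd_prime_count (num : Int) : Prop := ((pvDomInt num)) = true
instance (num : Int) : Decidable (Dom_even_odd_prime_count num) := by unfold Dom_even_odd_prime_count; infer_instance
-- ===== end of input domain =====

-- B replaces A's per-digit branch-and-increment loop by a digit-frequency table read off
-- by summing counts over the fixed digit classes (idiomatic; same O(d) cost).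


-- ===== PORT A =====
-- the body of A's for-loop: convert the digit char with int(), branch on parity, then on primality
-- (digit = int(digit): c is always a decimal digit char here, so int() never raises)
def aStep (prime_list : List Int) (st : Int × Int × Int) (c : Char) : Int × Int × Int :=
  let digit : Int := (PySem.Int.ofStr? (String.mk [c])).getD 0
  let st := if digit % 2 == 0 then (st.1 + 1, st.2.1, st.2.2)
            else if digit % 2 != 0 then (st.1, st.2.1 + 1, st.2.2) else st
  if prime_list.contains digit then (st.1, st.2.1, st.2.2 + 1) else st

def even_odd_prime_count (num : Int) : Int × Int × Int :=
  let prime_list : List Int := [2, 3, 5, 7]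
  (PySem.Int.toStr (if num < 0 then -num else num)).toList.foldl (aStep prime_list) (0, 0, 0)

-- ===== PORT B =====
def even_odd_prime_count_alt (num : Int) : Int × Int × Int :=
  let cnt : PySem.Dict Char Int :=
    (PySem.Int.toStr (if num < 0 then -num else num)).toList.foldl
      (fun d ch => d.insert ch (d.getD ch 0 + 1)) PySem.Dict.empty
  let even_count := "02468".toList.foldl (fun s d => s + cnt.getD d 0) 0
  let odd_count  := "13579".toList.foldl (fun s d => s + cnt.getD d 0) 0
  let prime_count := "2357".toList.foldl (fun s d => s + cnt.getD d 0) 0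
  (even_count, odd_count, prime_count)

-- ===== PRECONDITION & SPEC =====
def Spec_even_odd_prime_count (num : Int) (out : Int × Int × Int) : Prop := out = even_odd_prime_count_alt num
instance (num : Int) (out : Int × Int × Int) : Decidable (Spec_even_odd_prime_count num out) := by unfold Spec_even_odd_prime_count; infer_instance

-- ===== CLAIM (what is proved, stated in full; the proofs are below) =====
def Claim_equal_even_odd_prime_count : Prop := ∀ (num : Int), Dom_even_odd_prime_count num → Spec_even_odd_prime_count num (even_odd_prime_count num)

-- ===== LEMMAS AND PROOFS =====

-- every char produced by Nat.toDigitsCore with base 10 onto a digit-only accumulator is a decimal digit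
theorem toDigitsCore_digits (fuel n : Nat) (ds : List Char)
    (h : ∀ c ∈ ds, c ∈ ['0','1','2','3','4','5','6','7','8','9']) :
    ∀ c ∈ Nat.toDigitsCore 10 fuel n ds, c ∈ ['0','1','2','3','4','5','6','7','8','9'] := by
  induction fuel generalizing n ds with
  | zero => simpa [Nat.toDigitsCore] using h
  | succ fuel ih =>
    have hd : (n % 10).digitChar ∈ ['0','1','2','3','4','5','6','7','8','9'] := by
      have h10 : n % 10 < 10 := Nat.mod_lt _ (by norm_num)
      interval_cases h : (n % 10) <;> decide
    have h' : ∀ c ∈ (n % 10).digitChar :: ds, c ∈ ['0','1','2','3','4','5','6','7','8','9'] := by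
      intro c hc
      rcases List.mem_cons.mp hc with rfl | hc2
      · exact hd
      · exact h _ hc2
    simp only [Nat.toDigitsCore]
    split
    · simpa using h'
    · exact ih _ _ h'

theorem toChars_digits (n : Int) (hn : 0 ≤ n) :
    ∀ c ∈ PySem.Int.toChars n, c ∈ ['0','1','2','3','4','5','6','7','8','9'] := by
  unfold PySem.Int.toChars
  rw [if_neg (by omega)]
  exact toDigitsCore_digits _ _ _ (by simp)


theorem step0 (st : Int × Int × Int) : aStep [2, 3, 5, 7] st '0' = (st.1 + 1, st.2.1, st.2.2) := by
  have h : (PySem.Int.ofStr? (String.mk ['0'])).getD 0 = 0 := by decide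
  simp [aStep, h]
theorem step1 (st : Int × Int × Int) : aStep [2, 3, 5, 7] st '1' = (st.1, st.2.1 + 1, st.2.2) := by
  have h : (PySem.Int.ofStr? (String.mk ['1'])).getD 0 = 1 := by decide
  simp [aStep, h]
theorem step2 (st : Int × Int × Int) : aStep [2, 3, 5, 7] st '2' = (st.1 + 1, st.2.1, st.2.2 + 1) := by
  have h : (PySem.Int.ofStr? (String.mk ['2'])).getD 0 = 2 := by decide
  simp [aStep, h]
theorem step3 (st : Int × Int × Int) : aStep [2, 3, 5, 7] st '3' = (st.1, st.2.1 + 1, st.2.2 + 1) := by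
  have h : (PySem.Int.ofStr? (String.mk ['3'])).getD 0 = 3 := by decide
  simp [aStep, h]
theorem step4 (st : Int × Int × Int) : aStep [2, 3, 5, 7] st '4' = (st.1 + 1, st.2.1, st.2.2) := by
  have h : (PySem.Int.ofStr? (String.mk ['4'])).getD 0 = 4 := by decide
  simp [aStep, h]
theorem step5 (st : Int × Int × Int) : aStep [2, 3, 5, 7] st '5' = (st.1, st.2.1 + 1, st.2.2 + 1) := by
  have h : (PySem.Int.ofStr? (String.mk ['5'])).getD 0 = 5 := by decide
  simp [aStep, h]
theorem step6 (st : Int × Int × Int) : aStep [2, 3, 5, 7] st '6' = (st.1 + 1, st.2.1, st.2.2) := by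
  have h : (PySem.Int.ofStr? (String.mk ['6'])).getD 0 = 6 := by decide
  simp [aStep, h]
theorem step7 (st : Int × Int × Int) : aStep [2, 3, 5, 7] st '7' = (st.1, st.2.1 + 1, st.2.2 + 1) := by
  have h : (PySem.Int.ofStr? (String.mk ['7'])).getD 0 = 7 := by decide
  simp [aStep, h]
theorem step8 (st : Int × Int × Int) : aStep [2, 3, 5, 7] st '8' = (st.1 + 1, st.2.1, st.2.2) := by
  have h : (PySem.Int.ofStr? (String.mk ['8'])).getD 0 = 8 := by decide
  simp [aStep, h]
theorem step9 (st : Int × Int × Int) : aStep [2, 3, 5, 7] st '9' = (st.1, st.2.1 + 1, st.2.2) := by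
  have h : (PySem.Int.ofStr? (String.mk ['9'])).getD 0 = 9 := by decide
  simp [aStep, h]

-- counts of the digit classes in a char list, as A accumulates them
def eCnt (l : List Char) : Int :=
  (l.count '0' + l.count '2' + l.count '4' + l.count '6' + l.count '8' : Nat)
def oCnt (l : List Char) : Int :=
  (l.count '1' + l.count '3' + l.count '5' + l.count '7' + l.count '9' : Nat)
def pCnt (l : List Char) : Int :=
  (l.count '2' + l.count '3' + l.count '5' + l.count '7' : Nat)

theorem foldA_counts (l : List Char)
    (h : ∀ c ∈ l, c ∈ ['0','1','2','3','4','5','6','7','8','9']) (e o p : Int) :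
    l.foldl (aStep [2, 3, 5, 7]) (e, o, p) = (e + eCnt l, o + oCnt l, p + pCnt l) := by
  induction l generalizing e o p with
  | nil => simp [eCnt, oCnt, pCnt]
  | cons c t ih =>
    have hc := h c (by simp)
    have ht : ∀ x ∈ t, x ∈ ['0','1','2','3','4','5','6','7','8','9'] := fun x hx => h x (by simp [hx])
    fin_cases hc <;>
      rw [List.foldl_cons] <;>
      simp only [step0, step1, step2, step3, step4, step5, step6, step7, step8, step9] <;>
      rw [ih ht] <;>
      simp [eCnt, oCnt, pCnt, List.count_cons, Prod.ext_iff] <;>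
      all_goals omega

-- ===== VERDICT (by name: the statement is the Claim_ definition above) =====
theorem even_odd_prime_count_spec : Claim_equal_even_odd_prime_count := by
  intro num _
  show even_odd_prime_count num = even_odd_prime_count_alt num
  unfold even_odd_prime_count even_odd_prime_count_alt
  have hnn : (0 : Int) ≤ if num < 0 then -num else num := by split <;> omega
  set m : Int := if num < 0 then -num else num with hm
  have hdig := toChars_digits m hnn
  rw [PySem.Int.toList_toStr] at *
  rw [foldA_counts _ hdig]
  simp [PySem.Dict.getD_foldl_insert_add_one, eCnt, oCnt, pCnt, List.foldl]
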